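-- pv_equiv track=rewrite | github.com/binchoi/study | python/05-top-leet-questions/02-medium-collection/other/contiguous-subarray-with-pair-sum.py | solutionCorrect
-- ===== SOURCE A (Python) =====
-- from collections import defaultdict
--
-- def solutionCorrect(a, m, k):
--     num_subarray_with_sum_k = 0
--     cnt_in_subarray = defaultdict(int)
--     idx_subarray = defaultdict(int)
--     last_index = -1
--
--     for i in range(m):
--         if a[i] in idx_subarray:
--             num_subarray_with_sum_k = 1
--             last_index = idx_subarray[a[i]]
--         cnt_in_subarray[a[i]] += 1
--         idx_subarray[k - a[i]] = i
--
--     for i in range(m, len(a)):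
--         cnt_in_subarray[a[i - m]] -= 1
--         if cnt_in_subarray[a[i - m]] == 0:
--             del idx_subarray[k - a[i - m]]
--
--         if a[i] in idx_subarray:
--             num_subarray_with_sum_k += 1
--             last_index = max(idx_subarray[a[i]], last_index)
--         elif last_index > i - m:
--             num_subarray_with_sum_k += 1
--
--         cnt_in_subarray[a[i]] += 1
--         idx_subarray[k - a[i]] = i
--
--     return num_subarray_with_sum_k
-- ===== SOURCE B (Python) =====
-- def solutionCorrect(a, m, k):
--     count = 0
--     last = -1
--     for e in range(len(a)):
--         lo = e - m + 1
--         if lo < 0: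
--             lo = 0
--         p = -1
--         for j in range(lo, e):
--             if a[j] == k - a[e]:
--                 p = j
--         if e < m:
--             if p >= 0:
--                 count = 1
--                 last = p
--         else:
--             if p >= 0:
--                 count += 1
--                 last = max(last, p)
--             elif last > e - m:
--                 count += 1
--     return count
-- ===== Notes on version B (the rewrite author's own statement) =====
-- stated objective: simpler
-- what changed: Replaces A's two hash-map sliding-window loops (per-value counter, partner-index dict with eviction) by one plain pass over window ends that rescans the current window for the rightmost partner of a[e], keeping only the counter and the last pair index.
-- intended difference: For m = 0 on an array containing some pair summing to k, A returns the number of indices with an earlier partner (its window eviction never fires, so the dict grows unboundedly), while B returns 0, the intended count since every length-0 window is empty and contains no pair. — e.g. on solutionCorrect([1, 2], 0, 3): A returns 1, B returns 0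
import Mathlib
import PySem

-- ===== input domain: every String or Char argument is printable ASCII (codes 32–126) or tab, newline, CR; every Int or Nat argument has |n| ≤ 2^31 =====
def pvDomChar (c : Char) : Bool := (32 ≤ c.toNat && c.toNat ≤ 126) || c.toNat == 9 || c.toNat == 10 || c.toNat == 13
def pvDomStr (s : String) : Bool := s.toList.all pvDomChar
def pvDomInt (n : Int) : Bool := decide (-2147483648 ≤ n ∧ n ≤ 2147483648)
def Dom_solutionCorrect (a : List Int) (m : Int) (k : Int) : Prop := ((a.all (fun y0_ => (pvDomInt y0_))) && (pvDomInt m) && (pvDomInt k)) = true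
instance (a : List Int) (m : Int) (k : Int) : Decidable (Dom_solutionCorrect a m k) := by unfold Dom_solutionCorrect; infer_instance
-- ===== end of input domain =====

-- B replaces A's two hash-map sliding-window loops by one plain pass that rescans each
-- window for the rightmost partner of a[e] (objective: simpler; not faster).

-- ===== PORT A =====
-- first-loop body: for i in range(m)
def stepA1 (a : List Int) (k : Int)
    (st : Int × PySem.Dict Int Int × PySem.Dict Int Int × Int) (i : Int) :
    Int × PySem.Dict Int Int × PySem.Dict Int Int × Int :=
  match st with
  | (num, cnt, idx, last) =>
    let ai := PySem.List.pyGetD a i 0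
    match idx.get? ai with
    | some v => (1, cnt.modify ai 0 (· + 1), idx.insert (k - ai) i, v)
    | none => (num, cnt.modify ai 0 (· + 1), idx.insert (k - ai) i, last)

-- second-loop body: for i in range(m, len(a))
def stepA2 (a : List Int) (m : Int) (k : Int)
    (st : Int × PySem.Dict Int Int × PySem.Dict Int Int × Int) (i : Int) :
    Int × PySem.Dict Int Int × PySem.Dict Int Int × Int :=
  match st with
  | (num, cnt, idx, last) =>
    let x0 := PySem.List.pyGetD a (i - m) 0
    let cnt1 := cnt.modify x0 0 (· - 1)
    let idx1 := if cnt1.getD x0 0 == 0 then idx.erase (k - x0) else idx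
    let ai := PySem.List.pyGetD a i 0
    let nl : Int × Int :=
      match idx1.get? ai with
      | some v => (num + 1, max v last)
      | none => if last > i - m then (num + 1, last) else (num, last)
    (nl.1, cnt1.modify ai 0 (· + 1), idx1.insert (k - ai) i, nl.2)

def solutionCorrect (a : List Int) (m : Int) (k : Int) : Int :=
  let st0 : Int × PySem.Dict Int Int × PySem.Dict Int Int × Int :=
    (0, PySem.Dict.empty, PySem.Dict.empty, -1)
  let st1 := (PySem.List.pyRange 0 m 1).foldl (stepA1 a k) st0
  let st2 := (PySem.List.pyRange m (a.length : Int) 1).foldl (stepA2 a m k) st1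
  st2.1

-- ===== PORT B =====
-- loop body: one pass over window ends e, rescanning the window for the rightmost partner
def stepB (a : List Int) (m : Int) (k : Int) (st : Int × Int) (e : Int) : Int × Int :=
  match st with
  | (count, last) =>
    let lo := if e - m + 1 < 0 then 0 else e - m + 1
    let ae := PySem.List.pyGetD a e 0
    let p := (PySem.List.pyRange lo e 1).foldl
      (fun p j => if PySem.List.pyGetD a j 0 == k - ae then j else p) (-1)
    if e < m then
      if p ≥ 0 then (1, p) else (count, last)
    else
      if p ≥ 0 then (count + 1, max last p)
      else if last > e - m then (count + 1, last) else (count, last)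

def solutionCorrect_alt (a : List Int) (m : Int) (k : Int) : Int :=
  ((PySem.List.pyRange 0 (a.length : Int) 1).foldl (stepB a m k) (0, -1)).1

-- ===== PRECONDITION & SPEC =====
-- A raises IndexError whenever m < 0 or m > len(a) (and on no other input), so Pre_ is
-- exactly A's return domain.
def Pre_solutionCorrect (a : List Int) (m : Int) (k : Int) : Prop :=
  0 ≤ m ∧ m ≤ (a.length : Int)
instance (a : List Int) (m : Int) (k : Int) : Decidable (Pre_solutionCorrect a m k) := by
  unfold Pre_solutionCorrect; infer_instance

def pvWitness_solutionCorrect : List Int × Int × Int := ([1, 2, 3], 2, 3)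

-- For m = 0 on an array containing some pair summing to k, A returns the number of indices
-- with an earlier partner (its window eviction never fires, so its dict grows unboundedly),
-- while B returns 0, the intended count since every length-0 window is empty and has no pair.
def D_solutionCorrect (a : List Int) (m : Int) (k : Int) : Prop :=
  m = 0 ∧ ∃ e < a.length, ∃ j < e, a.getD j 0 + a.getD e 0 = k
instance (a : List Int) (m : Int) (k : Int) : Decidable (D_solutionCorrect a m k) := by
  unfold D_solutionCorrect; infer_instance

def Spec_solutionCorrect (a : List Int) (m : Int) (k : Int) (out : Int) : Prop :=
  ¬ D_solutionCorrect a m k → out = solutionCorrect_alt a m k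
instance (a : List Int) (m : Int) (k : Int) (out : Int) : Decidable (Spec_solutionCorrect a m k out) := by
  unfold Spec_solutionCorrect; infer_instance

def pvDiffWitness_solutionCorrect : List Int × Int × Int := ([1, 2], 0, 3)
def pvDiffWitnessOut_solutionCorrect : Int × Int := (1, 0)

-- ===== CLAIM (what is proved, stated in full; the proofs are below) =====
def Claim_unchanged_solutionCorrect : Prop := ∀ (a : List Int) (m : Int) (k : Int), Dom_solutionCorrect a m k → Pre_solutionCorrect a m k → Spec_solutionCorrect a m k (solutionCorrect a m k)
def Claim_changed_solutionCorrect : Prop := Dom_solutionCorrect (pvDiffWitness_solutionCorrect.1) (pvDiffWitness_solutionCorrect.2.1) (pvDiffWitness_solutionCorrect.2.2) ∧ Pre_solutionCorrect (pvDiffWitness_solutionCorrect.1) (pvDiffWitness_solutionCorrect.2.1) (pvDiffWitness_solutionCorrect.2.2) ∧ D_solutionCorrect (pvDiffWitness_solutionCorrect.1) (pvDiffWitness_solutionCorrect.2.1) (pvDiffWitness_solutionCorrect.2.2) ∧ solutionCorrect (pvDiffWitness_solutionCorrect.1) (pvDiffWitness_solutionCorrect.2.1) (pvDiffWitness_solutionCorrect.2.2)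 = pvDiffWitnessOut_solutionCorrect.1 ∧ solutionCorrect_alt (pvDiffWitness_solutionCorrect.1) (pvDiffWitness_solutionCorrect.2.1) (pvDiffWitness_solutionCorrect.2.2) = pvDiffWitnessOut_solutionCorrect.2 ∧ pvDiffWitnessOut_solutionCorrect.1 ≠ pvDiffWitnessOut_solutionCorrect.2
def Claim_exact_solutionCorrect : Prop := ∀ (a : List Int) (m : Int) (k : Int), Dom_solutionCorrect a m k → Pre_solutionCorrect a m k → D_solutionCorrect a m k → solutionCorrect a m k ≠ solutionCorrect_alt a m k

-- ===== LEMMAS AND PROOFS =====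

-- rightmost j in [lo, hi) with a[j] = x, else -1
def pfun (a : List Int) (x : Int) (lo hi : Nat) : Int :=
  (List.range' lo (hi - lo)).foldl (fun p j => if a.getD j 0 = x then (j : Int) else p) (-1)

-- number of j in [lo, hi) with a[j] = x
def occ (a : List Int) (x : Int) (lo hi : Nat) : Nat :=
  (List.range' lo (hi - lo)).countP (fun j => a.getD j 0 == x)

-- A's state after processing window ends < e (with m = mn)
def astate (a : List Int) (mn : Nat) (k : Int) (e : Nat) :
    Int × PySem.Dict Int Int × PySem.Dict Int Int × Int :=
  ((List.range' mn (e - mn)).map (fun (j : Nat) => (j : Int))).foldl (stepA2 a (mn : Int) k)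
    (((List.range (min e mn)).map (fun (j : Nat) => (j : Int))).foldl (stepA1 a k)
      (0, PySem.Dict.empty, PySem.Dict.empty, -1))

-- B's state after processing window ends < e
def bstate (a : List Int) (m : Int) (k : Int) (e : Nat) : Int × Int :=
  ((List.range e).map (fun (j : Nat) => (j : Int))).foldl (stepB a m k) (0, -1)

theorem get?_erase_dict {κ ν : Type} [BEq κ] [LawfulBEq κ] [DecidableEq κ] (d : PySem.Dict κ ν) (x y : κ) :
    (d.erase x).get? y = if y = x then none else d.get? y := by
  rcases d with ⟨items⟩
  simp only [PySem.Dict.erase, PySem.Dict.get?]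
  induction items with
  | nil => simp
  | cons p t ih =>
    by_cases hpx : p.1 = x
    · rw [List.filter_cons_of_neg (by simp [hpx])]
      by_cases hyx : y = x
      · rw [ih, if_pos hyx, if_pos hyx]
      · rw [ih, if_neg hyx, if_neg hyx,
          List.find?_cons_of_neg (by simp [hpx]; exact fun h => hyx h.symm)]
    · rw [List.filter_cons_of_pos (by simp [hpx])]
      by_cases hpy : p.1 = y
      · have hyx : ¬ y = x := by rintro rfl; exact hpx hpy
        rw [List.find?_cons_of_pos (by simp [hpy]), if_neg hyx,
          List.find?_cons_of_pos (by simp [hpy])]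
      · rw [List.find?_cons_of_neg (by simp [hpy]), List.find?_cons_of_neg (by simp [hpy]), ih]

theorem pfun_nil (a : List Int) (x : Int) (lo hi : Nat) (h : hi ≤ lo) : pfun a x lo hi = -1 := by
  simp [pfun, Nat.sub_eq_zero_of_le h]

theorem pfun_succ_right (a : List Int) (x : Int) (lo hi : Nat) (h : lo ≤ hi) :
    pfun a x lo (hi + 1) = if a.getD hi 0 = x then (hi : Int) else pfun a x lo hi := by
  have h1 : hi + 1 - lo = (hi - lo) + 1 := by omega
  have h2 : lo + (hi - lo) = hi := by omega
  simp only [pfun, h1, List.range'_concat, List.foldl_append, List.foldl_cons, List.foldl_nil, one_mul, h2]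

theorem pfun_cases (a : List Int) (x : Int) (lo hi : Nat) :
    pfun a x lo hi = -1 ∨ 0 ≤ pfun a x lo hi := by
  unfold pfun
  have key : ∀ (l : List Nat) (p : Int), (p = -1 ∨ 0 ≤ p) →
      (l.foldl (fun p j => if a.getD j 0 = x then (j : Int) else p) p = -1 ∨
       0 ≤ l.foldl (fun p j => if a.getD j 0 = x then (j : Int) else p) p) := by
    intro l
    induction l with
    | nil => intro p hp; simpa using hp
    | cons j t ih =>
      intro p hp
      simp only [List.foldl_cons]
      apply ih
      split
      · exact Or.inr (Int.natCast_nonneg j)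
      · exact hp
  exact key _ _ (Or.inl rfl)

theorem occ_nil (a : List Int) (x : Int) (lo hi : Nat) (h : hi ≤ lo) : occ a x lo hi = 0 := by
  simp [occ, Nat.sub_eq_zero_of_le h]

theorem occ_succ_right (a : List Int) (x : Int) (lo hi : Nat) (h : lo ≤ hi) :
    occ a x lo (hi + 1) = occ a x lo hi + (if a.getD hi 0 = x then 1 else 0) := by
  have h1 : hi + 1 - lo = (hi - lo) + 1 := by omega
  have h2 : lo + (hi - lo) = hi := by omega
  simp only [occ, h1, List.range'_concat, List.countP_append, one_mul, h2]
  split <;> simp_all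

theorem occ_cons_lo (a : List Int) (x : Int) (lo hi : Nat) (h : lo < hi) :
    occ a x lo hi = (if a.getD lo 0 = x then 1 else 0) + occ a x (lo + 1) hi := by
  have h1 : hi - lo = (hi - (lo + 1)) + 1 := by omega
  simp only [occ, h1, List.range'_succ, List.countP_cons]
  split <;> simp_all <;> omega

theorem pfun_neg_iff (a : List Int) (x : Int) (lo hi : Nat) :
    pfun a x lo hi = -1 ↔ occ a x lo hi = 0 := by
  induction hi with
  | zero => simp [pfun_nil a x lo 0 (by omega), occ_nil a x lo 0 (by omega)]
  | succ h ih =>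
    by_cases hlo : h + 1 ≤ lo
    · simp [pfun_nil a x lo _ hlo, occ_nil a x lo _ hlo]
    · have hle : lo ≤ h := by omega
      rw [pfun_succ_right a x lo h hle, occ_succ_right a x lo h hle]
      split
      · constructor
        · intro hc; exact absurd hc (by omega)
        · omega
      · simpa using ih

theorem pfun_drop_lo_ne (a : List Int) (x : Int) (lo hi : Nat) (h : a.getD lo 0 ≠ x) :
    pfun a x lo hi = pfun a x (lo + 1) hi := by
  induction hi with
  | zero => rw [pfun_nil a x lo 0 (by omega), pfun_nil a x (lo+1) 0 (by omega)]
  | succ hh ih =>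
    by_cases h1 : hh + 1 ≤ lo
    · rw [pfun_nil a x lo _ h1, pfun_nil a x (lo+1) _ (by omega)]
    · by_cases h2 : hh + 1 ≤ lo + 1
      · have : hh = lo := by omega
        subst this
        rw [pfun_succ_right a x hh hh (le_refl _), pfun_nil a x (hh+1) _ (le_refl _),
          pfun_nil a x hh hh (le_refl _), if_neg h]
      · rw [pfun_succ_right a x lo hh (by omega), pfun_succ_right a x (lo+1) hh (by omega), ih]

theorem pfun_drop_lo_occ (a : List Int) (x : Int) (lo hi : Nat) (h : occ a x (lo + 1) hi ≠ 0) :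
    pfun a x lo hi = pfun a x (lo + 1) hi := by
  induction hi with
  | zero => exact absurd (occ_nil a x (lo+1) 0 (by omega)) h
  | succ hh ih =>
    by_cases h1 : hh + 1 ≤ lo + 1
    · exact absurd (occ_nil a x (lo+1) _ h1) h
    · rw [occ_succ_right a x (lo+1) hh (by omega)] at h
      rw [pfun_succ_right a x lo hh (by omega), pfun_succ_right a x (lo+1) hh (by omega)]
      split
      · rfl
      · rename_i hne
        rw [if_neg hne] at h
        exact ih (by omega)

-- B's inner scan is pfun
theorem inner_eq_pfun (a : List Int) (x : Int) (lo hi : Nat) :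
    (PySem.List.pyRange (lo : Int) (hi : Int) 1).foldl
      (fun p j => if PySem.List.pyGetD a j 0 == x then j else p) (-1) = pfun a x lo hi := by
  have hn : (((hi : Int)) - (lo : Int)).toNat = hi - lo := by omega
  rw [PySem.List.pyRange_one, hn, List.foldl_map]
  unfold pfun
  rw [List.range'_eq_map_range, List.foldl_map]
  have hfun : (fun (p : Int) (t : Nat) =>
      if PySem.List.pyGetD a ((lo : Int) + (t : Int)) 0 == x then (lo : Int) + (t : Int) else p) =
      (fun (p : Int) (t : Nat) => if a.getD (lo + t) 0 = x then ((lo + t : Nat) : Int) else p) := by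
    funext p t
    have hc : (lo : Int) + (t : Int) = ((lo + t : Nat) : Int) := by push_cast; ring
    rw [hc, PySem.List.pyGetD_natCast]
    simp [beq_iff_eq]
  rw [hfun]

theorem astate_zero (a : List Int) (mn : Nat) (k : Int) :
    astate a mn k 0 = (0, PySem.Dict.empty, PySem.Dict.empty, -1) := by
  simp [astate]

theorem astate_succ (a : List Int) (mn : Nat) (k : Int) (e : Nat) :
    astate a mn k (e + 1) =
      (if e < mn then stepA1 a k (astate a mn k e) (e : Int)
       else stepA2 a (mn : Int) k (astate a mn k e) (e : Int)) := by
  by_cases h : e < mn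
  · have h1 : min (e + 1) mn = e + 1 := by omega
    have h2 : min e mn = e := by omega
    have h3 : e + 1 - mn = 0 := by omega
    have h4 : e - mn = 0 := by omega
    rw [if_pos h]
    simp [astate, h1, h2, h3, h4, List.range_succ]
  · have h1 : min (e + 1) mn = mn := by omega
    have h2 : min e mn = mn := by omega
    have h3 : e + 1 - mn = (e - mn) + 1 := by omega
    have h4 : mn + (e - mn) = e := by omega
    rw [if_neg h]
    simp only [astate, h1, h2, h3, List.range'_concat, one_mul, h4]
    rw [List.map_append, List.foldl_append]
    simp

theorem bstate_succ (a : List Int) (m k : Int) (e : Nat) :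
    bstate a m k (e + 1) = stepB a m k (bstate a m k e) (e : Int) := by
  simp [bstate, List.range_succ]

-- the joint invariant for 1 ≤ mn
def InvAB (a : List Int) (mn : Nat) (k : Int) (e : Nat) : Prop :=
  (astate a mn k e).1 = (bstate a (mn : Int) k e).1 ∧
  (astate a mn k e).2.2.2 = (bstate a (mn : Int) k e).2 ∧
  (∀ x : Int, (astate a mn k e).2.1.getD x 0 = (occ a x (e - mn) e : Int)) ∧
  (∀ y : Int, (astate a mn k e).2.2.1.get? y =
    (if 0 ≤ pfun a (k - y) (e - mn) e then some (pfun a (k - y) (e - mn) e) else none))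

-- inserting idx[k - a[e]] = e extends the partner-table invariant from window [lo,e) to [lo,e+1)
theorem idx_insert_inv (a : List Int) (k : Int) (lo e : Nat) (hle : lo ≤ e)
    (idx1 : PySem.Dict Int Int)
    (hinv : ∀ y, idx1.get? y =
      (if 0 ≤ pfun a (k - y) lo e then some (pfun a (k - y) lo e) else none)) :
    ∀ y, (idx1.insert (k - a.getD e 0) (e : Int)).get? y =
      (if 0 ≤ pfun a (k - y) lo (e + 1) then some (pfun a (k - y) lo (e + 1)) else none) := by
  intro y
  rw [PySem.Dict.get?_insert]
  by_cases hy : y = k - a.getD e 0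
  · have hky : k - y = a.getD e 0 := by omega
    rw [if_pos hy, hky, pfun_succ_right a _ lo e hle, if_pos rfl,
      if_pos (Int.natCast_nonneg e)]
  · have hky : a.getD e 0 ≠ k - y := by intro hh; apply hy; omega
    rw [if_neg hy, hinv y, pfun_succ_right a (k - y) lo e hle, if_neg hky]

-- incrementing cnt[a[e]] extends the window-count invariant from [lo,e) to [lo,e+1)
theorem cnt_modify_inv (a : List Int) (lo e : Nat) (hle : lo ≤ e)
    (cnt1 : PySem.Dict Int Int)
    (hinv : ∀ x, cnt1.getD x 0 = (occ a x lo e : Int)) :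
    ∀ x : Int, (cnt1.modify (a.getD e 0) 0 (· + 1)).getD x 0 = (occ a x lo (e + 1) : Int) := by
  intro x
  rw [PySem.Dict.getD_modify, occ_succ_right a x lo e hle]
  by_cases hx : x = a.getD e 0
  · subst hx
    rw [if_pos rfl, if_pos rfl, hinv]
    push_cast
    ring
  · rw [if_neg hx, if_neg (fun hh => hx hh.symm), hinv]
    push_cast
    ring

theorem inv_step (a : List Int) (mn : Nat) (k : Int) (hm : 1 ≤ mn) (e : Nat)
    (he : e < a.length) (h : InvAB a mn k e) : InvAB a mn k (e + 1) := by
  obtain ⟨h1, h2, h3, h4⟩ := h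
  rcases hst : astate a mn k e with ⟨num, cnt, idx, last⟩
  rcases hbs : bstate a (mn : Int) k e with ⟨bc, bl⟩
  rw [hst] at h1 h3 h4
  rw [hbs] at h1 h2
  rw [hst] at h2
  dsimp only at h1 h2 h3 h4
  unfold InvAB
  rw [astate_succ, bstate_succ, hst, hbs]
  have hff : ¬ ((0 : Int) ≤ -1) := by norm_num
  by_cases hem : e < mn
  · -- phase 1: e < mn (A's first loop)
    have hw0 : e - mn = 0 := by omega
    rw [hw0] at h3 h4
    have hw0' : e + 1 - mn = 0 := by omega
    rw [if_pos hem, hw0']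
    have hlo : (if ((e : Int) - (mn : Int) + 1 < 0) then (0 : Int)
        else (e : Int) - (mn : Int) + 1) = (((0 : Nat)) : Int) := by
      split <;> omega
    simp only [stepA1, stepB, PySem.List.pyGetD_natCast, hlo, inner_eq_pfun, ge_iff_le]
    rw [if_pos (by exact_mod_cast hem : (e : Int) < (mn : Int))]
    have hcnt2 := cnt_modify_inv a 0 e (Nat.zero_le e) cnt h3
    have hidx2 := idx_insert_inv a k 0 e (Nat.zero_le e) idx h4
    rw [h1, h2, h4 (a.getD e 0)]
    rcases pfun_cases a (k - a.getD e 0) 0 e with hp | hp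
    · rw [hp, if_neg hff, if_neg hff]
      exact ⟨rfl, rfl, hcnt2, hidx2⟩
    · rw [if_pos hp, if_pos hp]
      exact ⟨rfl, rfl, hcnt2, hidx2⟩
  · -- phase 2: mn ≤ e (A's second loop)
    have hmle : mn ≤ e := Nat.le_of_not_lt hem
    have hL1 : (e - mn) < e := by omega
    have hL2 : (e - mn) + 1 ≤ e := by omega
    have hw' : e + 1 - mn = (e - mn) + 1 := by omega
    rw [if_neg hem, hw']
    have hsub : ((e : Int) - (mn : Int)) = (((e - mn : Nat)) : Int) := by omega
    have hloB : (if (((e - mn : Nat) : Int) + 1 < 0) then (0 : Int)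
        else ((e - mn : Nat) : Int) + 1) = (((e - mn + 1 : Nat)) : Int) := by
      rw [if_neg (by omega)]
      omega
    simp only [stepA2, stepB, PySem.List.pyGetD_natCast, hsub, hloB, inner_eq_pfun, ge_iff_le]
    rw [if_neg (by exact_mod_cast hem : ¬ ((e : Int) < (mn : Int)))]
    have hcnt1 : ∀ x : Int, (cnt.modify (a.getD (e - mn) 0) 0 (· - 1)).getD x 0 =
        (occ a x (e - mn + 1) e : Int) := by
      intro x
      rw [PySem.Dict.getD_modify]
      by_cases hx : x = a.getD (e - mn) 0
      · subst hx
        rw [if_pos rfl, h3, occ_cons_lo a _ (e - mn) e hL1, if_pos rfl]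
        push_cast
        ring
      · rw [if_neg hx, h3, occ_cons_lo a x (e - mn) e hL1, if_neg (fun hh => hx hh.symm)]
        push_cast
        ring
    have hidx1 : ∀ y,
        (if (((cnt.modify (a.getD (e - mn) 0) 0 (· - 1)).getD (a.getD (e - mn) 0) 0) == 0) = true
          then idx.erase (k - a.getD (e - mn) 0) else idx).get? y =
        (if 0 ≤ pfun a (k - y) (e - mn + 1) e then some (pfun a (k - y) (e - mn + 1) e)
          else none) := by
      intro y
      rw [hcnt1 (a.getD (e - mn) 0)]
      by_cases hocc : occ a (a.getD (e - mn) 0) (e - mn + 1) e = 0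
      · rw [if_pos (by rw [hocc]; decide), get?_erase_dict]
        by_cases hy : y = k - a.getD (e - mn) 0
        · rw [if_pos hy]
          have hpm : pfun a (k - y) (e - mn + 1) e = -1 := by
            rw [pfun_neg_iff, show k - y = a.getD (e - mn) 0 by omega]
            exact hocc
          rw [hpm, if_neg hff]
        · have hne : a.getD (e - mn) 0 ≠ k - y := fun hh => hy (by omega)
          rw [if_neg hy, h4 y, pfun_drop_lo_ne a (k - y) (e - mn) e hne]
      · rw [if_neg (by simpa using hocc)]
        rw [h4 y]
        by_cases hy : k - y = a.getD (e - mn) 0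
        · rw [hy, ← pfun_drop_lo_occ a (a.getD (e - mn) 0) (e - mn) e hocc]
        · have hne : a.getD (e - mn) 0 ≠ k - y := fun hh => hy hh.symm
          rw [pfun_drop_lo_ne a (k - y) (e - mn) e hne]
    have hcnt2 := cnt_modify_inv a (e - mn + 1) e hL2 _ hcnt1
    have hidx2 := idx_insert_inv a k (e - mn + 1) e hL2 _ hidx1
    rw [h1, h2, hidx1 (a.getD e 0)]
    rcases pfun_cases a (k - a.getD e 0) (e - mn + 1) e with hp | hp
    · rw [hp, if_neg hff, if_neg hff]
      exact ⟨rfl, rfl, hcnt2, hidx2⟩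
    · rw [if_pos hp, if_pos hp]
      refine ⟨rfl, ?_, hcnt2, hidx2⟩
      dsimp only
      exact max_comm _ _

theorem inv_all (a : List Int) (mn : Nat) (k : Int) (hm : 1 ≤ mn) (e : Nat)
    (he : e ≤ a.length) : InvAB a mn k e := by
  induction e with
  | zero =>
    unfold InvAB
    rw [astate_zero]
    refine ⟨by simp [bstate], by simp [bstate], fun x => ?_, fun y => ?_⟩
    · rw [PySem.Dict.getD_empty, occ_nil a x (0 - mn) 0 (by omega)]
      simp
    · rw [PySem.Dict.get?_empty, pfun_nil a (k - y) (0 - mn) 0 (by omega), if_neg (by norm_num)]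
  | succ e ih => exact inv_step a mn k hm e (by omega) (ih (by omega))

-- results of the ports as astate/bstate at e = len(a)
theorem portA_eq_astate (a : List Int) (mn : Nat) (k : Int) (hmn : mn ≤ a.length) :
    solutionCorrect a (mn : Int) k = (astate a mn k a.length).1 := by
  have hr : PySem.List.pyRange (mn : Int) (a.length : Int) 1 =
      (List.range' mn (a.length - mn)).map (fun (j : Nat) => (j : Int)) := by
    rw [PySem.List.pyRange_one, List.range'_eq_map_range, List.map_map]
    have hc : ((a.length : Int) - (mn : Int)).toNat = a.length - mn := by omega
    rw [hc]
    refine List.map_congr_left fun t _ => ?_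
    simp only [Function.comp_apply]
    push_cast
    ring
  have hmin : min a.length mn = mn := by omega
  simp only [solutionCorrect, astate, hmin, hr, PySem.List.pyRange_zero_natCast]

theorem portB_eq_bstate (a : List Int) (m : Int) (k : Int) :
    solutionCorrect_alt a m k = (bstate a m k a.length).1 := by
  simp only [solutionCorrect_alt, bstate, PySem.List.pyRange_zero_natCast]

-- ===== the m = 0 regime =====
def cntPairs (a : List Int) (k : Int) (e : Nat) : Nat :=
  (List.range e).countP (fun e' => decide (∃ j < e', a.getD j 0 + a.getD e' 0 = k))

def InvA0 (a : List Int) (k : Int) (e : Nat) : Prop :=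
  (astate a 0 k e).1 = (cntPairs a k e : Int) ∧
  (astate a 0 k e).2.2.2 < (e : Int) ∧
  (∀ x : Int, (astate a 0 k e).2.1.getD x 0 = 0) ∧
  (∀ y : Int, ((astate a 0 k e).2.2.1.get? y ≠ none ↔ ∃ j < e, a.getD j 0 = k - y)) ∧
  (∀ y v, (astate a 0 k e).2.2.1.get? y = some v → v < (e : Int))

theorem cntPairs_succ (a : List Int) (k : Int) (e : Nat) :
    cntPairs a k (e + 1) =
      cntPairs a k e + (if ∃ j < e, a.getD j 0 + a.getD e 0 = k then 1 else 0) := by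
  simp [cntPairs, List.range_succ]

theorem inv0_all (a : List Int) (k : Int) (e : Nat) : InvA0 a k e := by
  induction e with
  | zero =>
    unfold InvA0
    rw [astate_zero]
    refine ⟨by simp [cntPairs], by norm_num, fun x => by simp [PySem.Dict.getD_empty],
      fun y => by simp [PySem.Dict.get?_empty], fun y v => by simp [PySem.Dict.get?_empty]⟩
  | succ e ih =>
    obtain ⟨i1, i2, i3, i4, i5⟩ := ih
    rcases hst : astate a 0 k e with ⟨num, cnt, idx, last⟩
    rw [hst] at i1 i2 i3 i4 i5
    dsimp only at i1 i2 i3 i4 i5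
    unfold InvA0
    rw [astate_succ, if_neg (by omega), hst]
    have hsub : ((e : Int) - ((0 : Nat) : Int)) = ((e : Nat) : Int) := by push_cast; ring
    simp only [stepA2, hsub, PySem.List.pyGetD_natCast]
    have hc1 : (cnt.modify (a.getD e 0) 0 (· - 1)).getD (a.getD e 0) 0 = -1 := by
      rw [PySem.Dict.getD_modify, if_pos rfl, i3]
      omega
    rw [hc1]
    have hcond : ((-1 : Int) == 0) = false := by decide
    rw [hcond]
    simp only [Bool.false_eq_true, if_false]
    have hcnt : ∀ x : Int,
        ((cnt.modify (a.getD e 0) 0 (· - 1)).modify (a.getD e 0) 0 (· + 1)).getD x 0 = 0 := by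
      intro x
      rw [PySem.Dict.getD_modify]
      by_cases hx : x = a.getD e 0
      · rw [if_pos hx, PySem.Dict.getD_modify, if_pos rfl, i3]
        omega
      · rw [if_neg hx, PySem.Dict.getD_modify, if_neg hx, i3]
    have hidx2 : ∀ y, ((idx.insert (k - a.getD e 0) (e : Int)).get? y ≠ none ↔
        ∃ j < e + 1, a.getD j 0 = k - y) := by
      intro y
      rw [PySem.Dict.get?_insert]
      by_cases hy : y = k - a.getD e 0
      · rw [if_pos hy]
        constructor
        · intro _; exact ⟨e, by omega, by omega⟩
        · intro _; simp
      · rw [if_neg hy, i4 y]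
        constructor
        · rintro ⟨j, hj, hja⟩; exact ⟨j, by omega, hja⟩
        · rintro ⟨j, hj, hja⟩
          refine ⟨j, ?_, hja⟩
          rcases Nat.lt_succ_iff_lt_or_eq.mp hj with h' | h'
          · exact h'
          · subst h'; exact absurd (by omega) hy
    have hlt2 : ∀ y v, (idx.insert (k - a.getD e 0) (e : Int)).get? y = some v →
        v < ((e + 1 : Nat) : Int) := by
      intro y v hv
      rw [PySem.Dict.get?_insert] at hv
      by_cases hy : y = k - a.getD e 0
      · rw [if_pos hy] at hv
        have : v = (e : Int) := by injection hv with hh; omega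
        push_cast
        omega
      · rw [if_neg hy] at hv
        have := i5 y v hv
        push_cast
        push_cast at this
        omega
    cases hg : idx.get? (a.getD e 0) with
    | some v =>
      have hvlt := i5 _ _ hg
      have hex : ∃ j < e, a.getD j 0 + a.getD e 0 = k := by
        have := (i4 (a.getD e 0)).mp (by rw [hg]; simp)
        obtain ⟨j, hj, hja⟩ := this
        exact ⟨j, hj, by omega⟩
      refine ⟨?_, ?_, hcnt, hidx2, hlt2⟩
      · dsimp only
        rw [cntPairs_succ, if_pos hex, i1]
        push_cast
        ring
      · dsimp only
        have h1 : v < ((e + 1 : Nat) : Int) := by push_cast; omega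
        have h2 : last < ((e + 1 : Nat) : Int) := by push_cast; omega
        exact max_lt h1 h2
    | none =>
      have hnex : ¬ ∃ j < e, a.getD j 0 + a.getD e 0 = k := by
        intro ⟨j, hj, hja⟩
        have : idx.get? (a.getD e 0) ≠ none := (i4 (a.getD e 0)).mpr ⟨j, hj, by omega⟩
        rw [hg] at this
        exact this rfl
      have hlast : ¬ last > (e : Int) := by omega
      refine ⟨?_, ?_, hcnt, hidx2, hlt2⟩
      · dsimp only
        rw [if_neg hlast, cntPairs_succ, if_neg hnex, i1]
        push_cast
        ring
      · dsimp only
        rw [if_neg hlast]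
        push_cast
        omega

theorem bstate_zero_m (a : List Int) (k : Int) (e : Nat) : bstate a 0 k e = (0, -1) := by
  induction e with
  | zero => simp [bstate]
  | succ e ih =>
    rw [bstate_succ, ih]
    simp only [stepB]
    rw [if_neg (by omega : ¬ ((e : Int) - 0 + 1 < 0)),
      PySem.List.pyRange_one_eq_nil (by omega : (e : Int) ≤ (e : Int) - 0 + 1)]
    simp only [List.foldl_nil]
    rw [if_neg (by omega : ¬ ((e : Int) < 0)), if_neg (by omega : ¬ ((-1 : Int) ≥ 0)),
      if_neg (by omega : ¬ ((-1 : Int) > (e : Int) - 0))]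

theorem portA_m0 (a : List Int) (k : Int) :
    solutionCorrect a 0 k = (cntPairs a k a.length : Int) := by
  have h := portA_eq_astate a 0 k (Nat.zero_le _)
  rw [Nat.cast_zero] at h
  rw [h]
  exact (inv0_all a k a.length).1

theorem portB_m0 (a : List Int) (k : Int) : solutionCorrect_alt a 0 k = 0 := by
  rw [portB_eq_bstate, bstate_zero_m]

theorem cntPairs_pos_iff (a : List Int) (k : Int) :
    (∃ e < a.length, ∃ j < e, a.getD j 0 + a.getD e 0 = k) ↔ 0 < cntPairs a k a.length := by
  rw [cntPairs, List.countP_pos_iff]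
  constructor
  · rintro ⟨e, he, hj⟩
    exact ⟨e, List.mem_range.mpr he, by simpa using hj⟩
  · rintro ⟨e, he, hp⟩
    exact ⟨e, List.mem_range.mp he, by simpa using hp⟩

-- ===== VERDICT (by name: the statement is the Claim_ definition above) =====
theorem solutionCorrect_spec : Claim_unchanged_solutionCorrect := by
  intro a m k _ hpre
  intro hnd
  obtain ⟨hm0, hmn⟩ := hpre
  obtain ⟨mn, rfl⟩ : ∃ mn : Nat, m = (mn : Int) := ⟨m.toNat, (Int.toNat_of_nonneg hm0).symm⟩
  have hlen : mn ≤ a.length := by exact_mod_cast hmn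
  by_cases hmz : mn = 0
  · subst hmz
    rw [Nat.cast_zero, portA_m0, portB_m0]
    have hnp : ¬ (∃ e < a.length, ∃ j < e, a.getD j 0 + a.getD e 0 = k) := by
      intro hx
      exact hnd ⟨by norm_num, hx⟩
    have := (cntPairs_pos_iff a k).not.mp hnp
    omega
  · have hinv := inv_all a mn k (by omega) a.length (le_refl _)
    rw [portA_eq_astate a mn k hlen, portB_eq_bstate]
    exact hinv.1

theorem solutionCorrect_changed : Claim_changed_solutionCorrect := by
  unfold Claim_changed_solutionCorrect; decide

theorem solutionCorrect_tight : Claim_exact_solutionCorrect := by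
  intro a m k _ _ hd
  obtain ⟨hm0, hx⟩ := hd
  rw [hm0, portA_m0, portB_m0]
  have := (cntPairs_pos_iff a k).mp hx
  omega
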